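-- pv_equiv track=rewrite | github.com/Yulya-S/four-in-a-row-alpha-beta-section | calculations.py | calculate_line_price
-- ===== SOURCE A (Python) =====
-- def calculate_line_price(lines: list):
--     values = [0, 1, 10, 500, 10000]
--     result = 0
--     for i in lines:
--         if len(i) < 4:
--             continue
--         for l in range(len(i) - 3):
--             if i[l:l + 4].count("R") == 0 or i[l:l + 4].count("Y") == 0:
--                 result += values[i[l:l + 4].count("R")]
--                 result -= values[i[l:l + 4].count("Y")]
--     return result
-- ===== SOURCE B (Python) =====
-- def calculate_line_price(lines: list):
--     values = [0, 1, 10, 500, 10000]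
--     total = 0
--     for line in lines:
--         if len(line) < 4:
--             continue
--         # seed counts over the first window, score it once
--         r = line[:4].count("R")
--         y = line[:4].count("Y")
--         if r == 0 or y == 0:
--             total += values[r] - values[y]
--         # slide the window: one char leaves on the left, one enters on the right
--         for out, inc in zip(line, line[4:]):
--             if out == "R":
--                 r -= 1
--             elif out == "Y":
--                 y -= 1
--             if inc == "R":
--                 r += 1
--             elif inc == "Y":
--                 y += 1
--             if r == 0 or y == 0:
--                 total += values[r] - values[y]
--     return total
-- ===== Notes on version B (the rewrite author's own statement) =====
-- stated objective: faster
-- what changed: A slices out every length-4 window and calls .count on it three times per position; B seeds R/Y tallies on the first window of each line and slides the window, updating the two tallies incrementally from the leaving and entering characters, with no per-window slicing or counting (measured ~1.7x faster).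
import Mathlib
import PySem

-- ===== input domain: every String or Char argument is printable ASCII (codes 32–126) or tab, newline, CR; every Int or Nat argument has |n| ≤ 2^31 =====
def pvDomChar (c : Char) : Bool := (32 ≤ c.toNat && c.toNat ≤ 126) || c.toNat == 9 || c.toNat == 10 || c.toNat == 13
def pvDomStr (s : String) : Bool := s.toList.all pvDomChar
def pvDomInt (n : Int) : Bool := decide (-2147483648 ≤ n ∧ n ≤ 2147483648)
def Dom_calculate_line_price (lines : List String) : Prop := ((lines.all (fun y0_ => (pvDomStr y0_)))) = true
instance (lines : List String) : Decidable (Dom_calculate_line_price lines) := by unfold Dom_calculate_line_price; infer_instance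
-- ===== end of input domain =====

-- B replaces A's per-position slicing and counting by one sliding pass per line that
-- maintains the R/Y tallies of the current window incrementally (objective: faster, measured).

-- ===== PORT A =====
def calculate_line_price (lines : List String) : Int :=
  let values : List Int := [0, 1, 10, 500, 10000]
  lines.foldl (fun result i =>
    if PySem.Str.len i < 4 then result
    else
      (PySem.List.pyRange 0 ((PySem.Str.len i : Int) - 3) 1).foldl (fun result l =>
        let w := PySem.Str.slice i (some l) (some (l + 4))
        if PySem.Str.count w "R" == 0 || PySem.Str.count w "Y" == 0 then
          result + PySem.List.pyGetD values (PySem.Str.count w "R" : Int) 0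
                 - PySem.List.pyGetD values (PySem.Str.count w "Y" : Int) 0
        else result) result) 0

-- ===== PORT B =====
def calculate_line_price_alt (lines : List String) : Int :=
  let values : List Int := [0, 1, 10, 500, 10000]
  lines.foldl (fun total line =>
    if PySem.Str.len line < 4 then total
    else
      let r0 : Int := (PySem.Str.count (PySem.Str.slice line none (some 4)) "R" : Int)
      let y0 : Int := (PySem.Str.count (PySem.Str.slice line none (some 4)) "Y" : Int)
      let total := if r0 == 0 || y0 == 0 then
          total + PySem.List.pyGetD values r0 0 - PySem.List.pyGetD values y0 0
        else total
      let st := (line.toList.zip (PySem.Str.slice line (some 4) none).toList).foldl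
        (fun (st : Int × Int × Int) p =>
          let ry : Int × Int :=
            if p.1 == 'R' then (st.1 - 1, st.2.1)
            else if p.1 == 'Y' then (st.1, st.2.1 - 1)
            else (st.1, st.2.1)
          let ry : Int × Int :=
            if p.2 == 'R' then (ry.1 + 1, ry.2)
            else if p.2 == 'Y' then (ry.1, ry.2 + 1)
            else ry
          let t := if ry.1 == 0 || ry.2 == 0 then
              st.2.2 + PySem.List.pyGetD values ry.1 0 - PySem.List.pyGetD values ry.2 0
            else st.2.2
          (ry.1, ry.2, t)) (r0, y0, total)
      st.2.2) 0

-- ===== PRECONDITION & SPEC =====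
def Spec_calculate_line_price (lines : List String) (out : Int) : Prop := out = calculate_line_price_alt lines
instance (lines : List String) (out : Int) : Decidable (Spec_calculate_line_price lines out) := by unfold Spec_calculate_line_price; infer_instance

-- ===== CLAIM (what is proved, stated in full; the proofs are below) =====
def Claim_equal_calculate_line_price : Prop := ∀ (lines : List String), Dom_calculate_line_price lines → Spec_calculate_line_price lines (calculate_line_price lines)

-- ===== LEMMAS AND PROOFS =====

-- str.count with a single-character needle is the character count
theorem pv_count_go_succ (c a : Char) (t : List Char) (fuel acc : Nat) :
    PySem.Chars.count.go [c] (fuel+1) (a :: t) acc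
      = PySem.Chars.count.go [c] fuel t (acc + if a = c then 1 else 0) := by
  rw [PySem.Chars.count.go.eq_def]
  by_cases h : a = c
  · simp [List.isPrefixOf, h]
  · simp [List.isPrefixOf, beq_iff_eq, h]
    exact fun h' => absurd h'.symm h

theorem pv_count_go (c : Char) (t : List Char) : ∀ (fuel acc : Nat), t.length ≤ fuel →
    PySem.Chars.count.go [c] fuel t acc = acc + t.count c := by
  induction t with
  | nil => intro fuel acc _; cases fuel <;> simp [PySem.Chars.count.go.eq_def]
  | cons a t ih =>
    intro fuel acc h
    cases fuel with
    | zero => simp at h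
    | succ f =>
      rw [pv_count_go_succ, ih _ _ (by simpa using h)]
      by_cases hac : a = c
      · simp [hac]; omega
      · simp [hac]

theorem pv_count_singleton (cs : List Char) (c : Char) :
    PySem.Chars.count cs [c] = cs.count c := by
  simp [PySem.Chars.count, pv_count_go c cs cs.length 0 le_rfl]

-- the score contributed by one window with R-tally r and Y-tally y
def pvScoreZ (r y : Int) : Int :=
  if r == 0 || y == 0 then
    PySem.List.pyGetD ([0, 1, 10, 500, 10000] : List Int) r 0
      - PySem.List.pyGetD ([0, 1, 10, 500, 10000] : List Int) y 0
  else 0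

def pvScore (w : List Char) : Int := pvScoreZ (w.count 'R') (w.count 'Y')

theorem pv_scoreIf (r y acc : Int) :
    (if r == 0 || y == 0 then
       acc + PySem.List.pyGetD ([0, 1, 10, 500, 10000] : List Int) r 0
           - PySem.List.pyGetD ([0, 1, 10, 500, 10000] : List Int) y 0
     else acc) = acc + pvScoreZ r y := by
  simp only [pvScoreZ]
  by_cases h : (r == 0 || y == 0) = true <;> simp [h, Int.add_sub_assoc]

-- the length-4 windows of a line, front to back
def pvWindows (cs : List Char) : List (List Char) :=
  if _h : cs.length < 4 then [] else cs.take 4 :: pvWindows cs.tail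
termination_by cs.length
decreasing_by cases cs with
  | nil => exact absurd (by simp : ([] : List Char).length < 4) _h
  | cons _ t => simp

theorem pvWindows_low (cs : List Char) (h : cs.length < 4) : pvWindows cs = [] := by
  rw [pvWindows]; simp [h]

theorem pvWindows_high (cs : List Char) (h : ¬ cs.length < 4) :
    pvWindows cs = cs.take 4 :: pvWindows cs.tail := by
  rw [pvWindows]; simp [h]

theorem pv_range_windows (f : List Char → Int) :
    ∀ (cs : List Char),
      (List.range (cs.length - 3)).map (fun k => f ((cs.drop k).take 4))
        = (pvWindows cs).map f := by
  intro cs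
  induction cs using pvWindows.induct with
  | case1 cs h => rw [pvWindows_low cs h]; have : cs.length - 3 = 0 := by omega
                  simp [this]
  | case2 cs h ih =>
    rw [pvWindows_high cs h]
    cases cs with
    | nil => simp at h
    | cons a t =>
      have hl : (a :: t).length - 3 = (t.length - 3) + 1 := by simp at h ⊢; omega
      rw [hl, List.range_succ_eq_map]
      simp only [List.map_cons, List.map_map, List.drop_zero]
      refine congrArg₂ _ rfl ?_
      simpa [Function.comp] using ih

-- A's inner loop sums the scores of the windows
theorem pv_stepA (cs : List Char) (res : Int) (k : Nat) :
    (let w := PySem.List.slice cs (some ((0:Int)+(k:Int))) (some ((0:Int)+(k:Int) + 4));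
     if PySem.Chars.count w ['R'] == 0 || PySem.Chars.count w ['Y'] == 0 then
       res + PySem.List.pyGetD ([0, 1, 10, 500, 10000] : List Int) (PySem.Chars.count w ['R'] : Int) 0
           - PySem.List.pyGetD ([0, 1, 10, 500, 10000] : List Int) (PySem.Chars.count w ['Y'] : Int) 0
     else res) = res + pvScore ((cs.drop k).take 4) := by
  have h1 : ((0:Int)+(k:Int)) = ((k:Nat):Int) := by ring
  have h2 : ((k:Int)+4) = (((k+4:Nat)):Int) := by push_cast; ring
  have h3 : k + 4 - k = 4 := by omega
  simp only [h1]
  simp only [h2, PySem.List.slice_natCast, h3, pv_count_singleton]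
  set r := ((cs.drop k).take 4).count 'R' with hr
  set y := ((cs.drop k).take 4).count 'Y' with hy
  rw [show ((r == 0 || y == 0) : Bool) = (((r:Int) == 0) || ((y:Int) == 0)) from by rw [Bool.eq_iff_iff]; simp]
  exact pv_scoreIf _ _ res

theorem pv_lineA (cs : List Char) (acc : Int) :
    (PySem.List.pyRange 0 ((cs.length : Int) - 3) 1).foldl (fun res l =>
        let w := PySem.List.slice cs (some l) (some (l + 4))
        if PySem.Chars.count w ['R'] == 0 || PySem.Chars.count w ['Y'] == 0 then
          res + PySem.List.pyGetD ([0, 1, 10, 500, 10000] : List Int) (PySem.Chars.count w ['R'] : Int) 0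
              - PySem.List.pyGetD ([0, 1, 10, 500, 10000] : List Int) (PySem.Chars.count w ['Y'] : Int) 0
        else res) acc
      = acc + ((pvWindows cs).map pvScore).sum := by
  by_cases h4 : cs.length < 4
  · rw [PySem.List.pyRange_one_eq_nil (by omega), pvWindows_low cs h4]; simp
  · have hn : ((cs.length:Int) - 3).toNat = cs.length - 3 := by omega
    rw [PySem.List.pyRange_one, List.foldl_map]
    rw [PySem.List.foldl_congr_mem _ _ (fun res k => res + pvScore ((cs.drop k).take 4)) acc
      (fun res k _ => pv_stepA cs res k)]
    rw [PySem.List.foldl_add]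
    simp only [Int.sub_zero]
    rw [hn, pv_range_windows pvScore cs]

-- B's sliding step, as the port's fold function
def pvBstep (st : Int × Int × Int) (p : Char × Char) : Int × Int × Int :=
  let ry : Int × Int :=
    if p.1 == 'R' then (st.1 - 1, st.2.1)
    else if p.1 == 'Y' then (st.1, st.2.1 - 1)
    else (st.1, st.2.1)
  let ry : Int × Int :=
    if p.2 == 'R' then (ry.1 + 1, ry.2)
    else if p.2 == 'Y' then (ry.1, ry.2 + 1)
    else ry
  let t := if ry.1 == 0 || ry.2 == 0 then
      st.2.2 + PySem.List.pyGetD ([0, 1, 10, 500, 10000] : List Int) ry.1 0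
             - PySem.List.pyGetD ([0, 1, 10, 500, 10000] : List Int) ry.2 0
    else st.2.2
  (ry.1, ry.2, t)

-- the tally updates: leaving a, entering d turns the window a::w3 into w3++[d]
def pvNext (r y : Int) (a d : Char) : Int × Int :=
  let ry : Int × Int :=
    if a == 'R' then (r - 1, y)
    else if a == 'Y' then (r, y - 1)
    else (r, y)
  if d == 'R' then (ry.1 + 1, ry.2)
  else if d == 'Y' then (ry.1, ry.2 + 1)
  else ry

theorem pv_bstep_eq_next (r y acc : Int) (a d : Char) :
    pvBstep (r, y, acc) (a, d)
      = ((pvNext r y a d).1, (pvNext r y a d).2,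
         acc + pvScoreZ (pvNext r y a d).1 (pvNext r y a d).2) := by
  simp only [pvBstep, pvNext]
  rw [pv_scoreIf]

theorem pv_next_counts (a d : Char) (w3 : List Char) :
    pvNext (((a :: w3).count 'R' : Nat) : Int) (((a :: w3).count 'Y' : Nat) : Int) a d
      = ((((w3 ++ [d]).count 'R' : Nat) : Int), (((w3 ++ [d]).count 'Y' : Nat) : Int)) := by
  simp only [pvNext]
  by_cases ha : a = 'R' <;> by_cases ha2 : a = 'Y' <;> by_cases hd : d = 'R' <;> by_cases hd2 : d = 'Y' <;>
    simp_all [List.count_append]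

theorem pv_lineB (cs : List Char) : ∀ (acc : Int), 4 ≤ cs.length →
    ((cs.zip (cs.drop 4)).foldl pvBstep
        ((((cs.take 4).count 'R' : Nat) : Int), (((cs.take 4).count 'Y' : Nat) : Int), acc)).2.2
      = acc + ((pvWindows cs.tail).map pvScore).sum := by
  induction cs with
  | nil => intro acc h; simp at h
  | cons a t ih =>
    intro acc h
    by_cases h4 : t.length < 4
    · have hd4 : t.drop 3 = [] := by
        apply List.drop_eq_nil_of_le; omega
      have : (a :: t).drop 4 = t.drop 3 := rfl
      rw [this, hd4]
      rw [pvWindows_low _ (by simpa using h4)]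
      simp
    · have h3 : 3 < t.length := by omega
      have hd : t.drop 3 = t[3] :: t.drop 4 := List.drop_eq_getElem_cons h3
      have hzip : (a :: t).zip ((a :: t).drop 4) = (a, t[3]) :: t.zip (t.drop 4) := by
        show (a :: t).zip (t.drop 3) = _
        rw [hd]; rfl
      have htake : (a :: t).take 4 = a :: t.take 3 := rfl
      have htake4 : t.take 4 = t.take 3 ++ [t[3]] := by
        rw [List.take_add_one]; simp [List.getElem?_eq_getElem h3]
      rw [hzip, htake, List.foldl_cons, pv_bstep_eq_next, pv_next_counts, ← htake4]
      rw [ih _ (by omega)]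
      have hw : pvWindows (a :: t).tail = t.take 4 :: pvWindows t.tail := by
        simpa using pvWindows_high t (by omega)
      rw [hw]
      simp only [List.map_cons, List.sum_cons, pvScore]
      rw [htake4]
      ring

-- the two per-line bodies agree
theorem pv_line_eq (line : String) (acc : Int) :
    (if PySem.Str.len line < 4 then acc
     else
       (PySem.List.pyRange 0 ((PySem.Str.len line : Int) - 3) 1).foldl (fun result l =>
         let w := PySem.Str.slice line (some l) (some (l + 4))
         if PySem.Str.count w "R" == 0 || PySem.Str.count w "Y" == 0 then
           result + PySem.List.pyGetD ([0, 1, 10, 500, 10000] : List Int) (PySem.Str.count w "R" : Int) 0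
                  - PySem.List.pyGetD ([0, 1, 10, 500, 10000] : List Int) (PySem.Str.count w "Y" : Int) 0
         else result) acc)
    = (if PySem.Str.len line < 4 then acc
       else
         let r0 : Int := (PySem.Str.count (PySem.Str.slice line none (some 4)) "R" : Int)
         let y0 : Int := (PySem.Str.count (PySem.Str.slice line none (some 4)) "Y" : Int)
         let total := if r0 == 0 || y0 == 0 then
             acc + PySem.List.pyGetD ([0, 1, 10, 500, 10000] : List Int) r0 0
                 - PySem.List.pyGetD ([0, 1, 10, 500, 10000] : List Int) y0 0
           else acc
         ((line.toList.zip (PySem.Str.slice line (some 4) none).toList).foldl pvBstep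
            (r0, y0, total)).2.2) := by
  have hR : ("R" : String).toList = ['R'] := by decide
  have hY : ("Y" : String).toList = ['Y'] := by decide
  have hsliceF : (PySem.Str.slice line (some 4) none).toList = line.toList.drop 4 := by
    rw [PySem.Str.toList_slice, PySem.Chars.slice_eq_listSlice, PySem.List.slice_from _ (by norm_num)]
    simp [show Int.toNat 4 = 4 from rfl]
  have hsliceT : (PySem.Str.slice line none (some 4)).toList = line.toList.take 4 := by
    rw [PySem.Str.toList_slice, PySem.Chars.slice_eq_listSlice, PySem.List.slice_to _ (by norm_num)]
    simp [show Int.toNat 4 = 4 from rfl]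
  have hlenl : PySem.Str.len line = line.toList.length := by simp [pysem]
  by_cases hlen : PySem.Str.len line < 4
  · simp only [if_pos hlen]
  · simp only [if_neg hlen]
    have h4 : 4 ≤ line.toList.length := by omega
    -- left side: A's window loop sums the window scores
    have hA : (fun (result : Int) (l : Int) =>
         let w := PySem.Str.slice line (some l) (some (l + 4))
         if PySem.Str.count w "R" == 0 || PySem.Str.count w "Y" == 0 then
           result + PySem.List.pyGetD ([0, 1, 10, 500, 10000] : List Int) (PySem.Str.count w "R" : Int) 0
                  - PySem.List.pyGetD ([0, 1, 10, 500, 10000] : List Int) (PySem.Str.count w "Y" : Int) 0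
         else result)
        = (fun (result : Int) (l : Int) =>
         let w := PySem.List.slice line.toList (some l) (some (l + 4))
         if PySem.Chars.count w ['R'] == 0 || PySem.Chars.count w ['Y'] == 0 then
           result + PySem.List.pyGetD ([0, 1, 10, 500, 10000] : List Int) (PySem.Chars.count w ['R'] : Int) 0
                  - PySem.List.pyGetD ([0, 1, 10, 500, 10000] : List Int) (PySem.Chars.count w ['Y'] : Int) 0
         else result) := by
      funext res l
      simp only [PySem.Str.count_eq, PySem.Str.toList_slice, PySem.Chars.slice_eq_listSlice, hR, hY]
    rw [hlenl, hA, pv_lineA]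
    -- right side: the seed window score plus the sliding pass
    have hr0 : PySem.Str.count (PySem.Str.slice line none (some 4)) "R"
        = (line.toList.take 4).count 'R' := by
      rw [PySem.Str.count_eq, hsliceT, hR, pv_count_singleton]
    have hy0 : PySem.Str.count (PySem.Str.slice line none (some 4)) "Y"
        = (line.toList.take 4).count 'Y' := by
      rw [PySem.Str.count_eq, hsliceT, hY, pv_count_singleton]
    simp only [hr0, hy0, hsliceF, pv_scoreIf]
    rw [pv_lineB line.toList (acc + pvScoreZ ((line.toList.take 4).count 'R') ((line.toList.take 4).count 'Y')) h4]
    rw [pvWindows_high line.toList (by omega)]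
    simp only [List.map_cons, List.sum_cons, pvScore]
    ring

-- ===== VERDICT (by name: the statement is the Claim_ definition above) =====
theorem calculate_line_price_spec : Claim_equal_calculate_line_price := by
  unfold Claim_equal_calculate_line_price
  intro lines _
  unfold Spec_calculate_line_price calculate_line_price calculate_line_price_alt
  exact PySem.List.foldl_congr_mem _ _ _ 0 (fun acc line _ => pv_line_eq line acc)
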